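-- pv_equiv track=rewrite | github.com/shanry/FastDesign | utils/structure.py | dotbracket2constraint
-- ===== SOURCE A (Python) =====
-- def dotbracket2constraint(line: str) -> str:
--     length = len(line)
--     constraint = ['?'] * length
--
--     if length > 0:
--         constraint[0] = '('
--         constraint[-1] = ')'
--
--     for i, x in enumerate(line):
--         if x == '*':
--             constraint[i] = '...'
--             if i > 0:
--                 constraint[i - 1] = '('
--             if i + 1 < length:
--                 constraint[i + 1] = ')'
--
--     return ''.join(constraint)
-- ===== SOURCE B (Python) =====
-- def dotbracket2constraint(line: str) -> str:
--     n = len(line)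
--
--     def cell(j):
--         # last-write-wins precedence of the scatter loop, read as a gather:
--         if j + 1 < n and line[j + 1] == '*':
--             return '('
--         if line[j] == '*':
--             return '...'
--         if j - 1 >= 0 and line[j - 1] == '*':
--             return ')'
--         if j == n - 1:
--             return ')'
--         if j == 0:
--             return '('
--         return '?'
--
--     return ''.join(cell(j) for j in range(n))
-- ===== Notes on version B (the rewrite author's own statement) =====
-- stated objective: alternative
-- what changed: Replaces the mutating scatter loop (which writes endpoint marks and then overwrites neighbours of each '*') by a single gather pass that computes every output character independently from its two neighbours, encoding the last-write-wins precedence as an if-chain.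
import Mathlib
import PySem

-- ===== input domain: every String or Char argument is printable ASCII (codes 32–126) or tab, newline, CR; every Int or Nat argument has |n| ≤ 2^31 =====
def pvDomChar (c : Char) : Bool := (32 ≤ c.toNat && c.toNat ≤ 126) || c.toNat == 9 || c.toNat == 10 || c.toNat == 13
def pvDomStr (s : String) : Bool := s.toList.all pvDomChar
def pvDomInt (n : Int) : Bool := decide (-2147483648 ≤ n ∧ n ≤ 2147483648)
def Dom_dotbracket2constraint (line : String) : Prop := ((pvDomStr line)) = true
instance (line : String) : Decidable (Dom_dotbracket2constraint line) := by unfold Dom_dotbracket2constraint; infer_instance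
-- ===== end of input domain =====

-- B replaces A's mutating scatter loop with a gather pass computing each character from its neighbours (objective: alternative decomposition, same cost).

-- ===== PORT A =====
-- one iteration of A's for-loop body (loop indices from enumerate are ≥ 0, so .toNat is exact)
def pvStepA (length : Nat) (c : List String) (p : Int × Char) : List String :=
  if p.2 = '*' then
    let c1 := c.set p.1.toNat "..."
    let c2 := if p.1 > 0 then c1.set (p.1 - 1).toNat "(" else c1
    if p.1 + 1 < (length : Int) then c2.set (p.1 + 1).toNat ")" else c2
  else c

def dotbracket2constraint (line : String) : String :=
  let cs := line.toList
  let length := cs.length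
  let constraint : List String := List.replicate length "?"
  let constraint :=
    if length > 0 then (constraint.set 0 "(").set (length - 1) ")" else constraint
  let constraint := (PySem.List.enumerate cs 0).foldl (pvStepA length) constraint
  String.join constraint

-- ===== PORT B =====
def pvCellB (cs : List Char) (n : Nat) (j : Nat) : String :=
  if j + 1 < n ∧ cs[j+1]? = some '*' then "("
  else if cs[j]? = some '*' then "..."
  else if 1 ≤ j ∧ cs[j-1]? = some '*' then ")"
  else if j = n - 1 then ")"
  else if j = 0 then "("
  else "?"

def dotbracket2constraint_alt (line : String) : String :=
  let cs := line.toList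
  let n := cs.length
  String.join ((List.range n).map (pvCellB cs n))

-- ===== PRECONDITION & SPEC =====
def Spec_dotbracket2constraint (line : String) (out : String) : Prop := out = dotbracket2constraint_alt line
instance (line : String) (out : String) : Decidable (Spec_dotbracket2constraint line out) := by unfold Spec_dotbracket2constraint; infer_instance

-- ===== CLAIM (what is proved, stated in full; the proofs are below) =====
def Claim_equal_dotbracket2constraint : Prop := ∀ (line : String), Dom_dotbracket2constraint line → Spec_dotbracket2constraint line (dotbracket2constraint line)

-- ===== LEMMAS AND PROOFS =====

-- value of A's array at position j after the loop has processed iterations 0..k-1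
def pvCell (cs : List Char) (k j : Nat) : String :=
  if j + 1 < k ∧ cs[j+1]? = some '*' then "("
  else if j < k ∧ cs[j]? = some '*' then "..."
  else if 1 ≤ j ∧ j - 1 < k ∧ cs[j-1]? = some '*' then ")"
  else if j + 1 = cs.length then ")"
  else if j = 0 then "("
  else "?"

def pvInv (cs : List Char) (k : Nat) (acc : List String) : Prop :=
  acc.length = cs.length ∧ ∀ j, j < cs.length → acc[j]? = some (pvCell cs k j)

theorem pvCell_frozen (cs : List Char) (k j : Nat) (hnot : cs[k]? ≠ some '*') :
    pvCell cs (k + 1) j = pvCell cs k j := by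
  unfold pvCell
  have g1 : (j + 1 < k + 1 ∧ cs[j+1]? = some '*') ↔ (j + 1 < k ∧ cs[j+1]? = some '*') := by
    constructor
    · rintro ⟨a, b⟩
      refine ⟨?_, b⟩
      rcases Nat.lt_or_ge (j + 1) k with h | h
      · exact h
      · exact absurd (by rw [show j + 1 = k by omega] at b; exact b) hnot
    · rintro ⟨a, b⟩; exact ⟨by omega, b⟩
  have g2 : (j < k + 1 ∧ cs[j]? = some '*') ↔ (j < k ∧ cs[j]? = some '*') := by
    constructor
    · rintro ⟨a, b⟩
      refine ⟨?_, b⟩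
      rcases Nat.lt_or_ge j k with h | h
      · exact h
      · exact absurd (by rw [show j = k by omega] at b; exact b) hnot
    · rintro ⟨a, b⟩; exact ⟨by omega, b⟩
  have g3 : (1 ≤ j ∧ j - 1 < k + 1 ∧ cs[j-1]? = some '*') ↔
      (1 ≤ j ∧ j - 1 < k ∧ cs[j-1]? = some '*') := by
    constructor
    · rintro ⟨a, b, c⟩
      refine ⟨a, ?_, c⟩
      rcases Nat.lt_or_ge (j - 1) k with h | h
      · exact h
      · exact absurd (by rw [show j - 1 = k by omega] at c; exact c) hnot
    · rintro ⟨a, b, c⟩; exact ⟨a, by omega, c⟩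
  simp only [g1, g2, g3]

theorem pvCell_away (cs : List Char) (k j : Nat)
    (h1 : j ≠ k) (h2 : j + 1 ≠ k) (h3 : j ≠ k + 1) :
    pvCell cs (k + 1) j = pvCell cs k j := by
  unfold pvCell
  have g1 : (j + 1 < k + 1 ∧ cs[j+1]? = some '*') ↔ (j + 1 < k ∧ cs[j+1]? = some '*') := by
    constructor <;> rintro ⟨a, b⟩ <;> exact ⟨by omega, b⟩
  have g2 : (j < k + 1 ∧ cs[j]? = some '*') ↔ (j < k ∧ cs[j]? = some '*') := by
    constructor <;> rintro ⟨a, b⟩ <;> exact ⟨by omega, b⟩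
  have g3 : (1 ≤ j ∧ j - 1 < k + 1 ∧ cs[j-1]? = some '*') ↔
      (1 ≤ j ∧ j - 1 < k ∧ cs[j-1]? = some '*') := by
    constructor <;> rintro ⟨a, b, c⟩ <;> exact ⟨a, by omega, c⟩
  simp only [g1, g2, g3]

theorem pvCell_at_succ (cs : List Char) (k : Nat) (hget : cs[k]? = some '*') :
    pvCell cs (k + 1) (k + 1) = ")" := by
  unfold pvCell
  rw [if_neg (by rintro ⟨a, -⟩; omega), if_neg (by rintro ⟨a, -⟩; omega), if_pos]
  refine ⟨by omega, by omega, ?_⟩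
  simpa using hget

theorem pvCell_at_self (cs : List Char) (k : Nat) (hget : cs[k]? = some '*') :
    pvCell cs (k + 1) k = "..." := by
  unfold pvCell
  rw [if_neg (by rintro ⟨a, -⟩; omega), if_pos ⟨by omega, hget⟩]

theorem pvCell_at_pred (cs : List Char) (k : Nat) (hget : cs[k]? = some '*')
    (h0 : 0 < k) : pvCell cs (k + 1) (k - 1) = "(" := by
  unfold pvCell
  rw [if_pos]
  refine ⟨by omega, ?_⟩
  rw [Nat.sub_add_cancel h0]; exact hget

theorem pvInv_init (cs : List Char) :
    pvInv cs 0 (if cs.length > 0 then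
        ((List.replicate cs.length "?").set 0 "(").set (cs.length - 1) ")"
      else List.replicate cs.length "?") := by
  constructor
  · split <;> simp
  · intro j hj
    rw [if_pos (by omega)]
    simp only [List.getElem?_set, List.length_set, List.length_replicate,
      List.getElem?_replicate]
    unfold pvCell
    have hg1 : ¬(j + 1 < 0 ∧ cs[j+1]? = some '*') := by rintro ⟨a, -⟩; omega
    have hg2 : ¬(j < 0 ∧ cs[j]? = some '*') := by rintro ⟨a, -⟩; omega
    have hg3 : ¬(1 ≤ j ∧ j - 1 < 0 ∧ cs[j-1]? = some '*') := by rintro ⟨-, a, -⟩; omega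
    rw [if_neg hg1, if_neg hg2, if_neg hg3]
    split_ifs <;> first | rfl | omega

theorem pvInv_step (cs : List Char) (k : Nat) (c : List String)
    (hk : k < cs.length) (h : pvInv cs k c) :
    pvInv cs (k + 1) (pvStepA cs.length c ((k : Int), cs[k])) := by
  obtain ⟨hlen, hval⟩ := h
  have hgetc : cs[k]? = some cs[k] := List.getElem?_eq_getElem hk
  by_cases hstar : cs[k] = '*'
  · have hget : cs[k]? = some '*' := by rw [hgetc, hstar]
    unfold pvStepA
    simp only [hstar]
    have e0 : ((k : Int)).toNat = k := by omega
    have e1 : ((k : Int) - 1).toNat = k - 1 := by omega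
    have e2 : ((k : Int) + 1).toNat = k + 1 := by omega
    have e3 : ((k : Int) > 0) ↔ 0 < k := by omega
    have e4 : ((k : Int) + 1 < (cs.length : Int)) ↔ k + 1 < cs.length := by omega
    simp only [e0, e1, e2, e3, e4]
    constructor
    · split_ifs <;> simp [hlen]
    · intro j hj
      by_cases h0 : 0 < k <;> by_cases hK : k + 1 < cs.length
      · -- 0 < k, k+1 < n
        rw [if_pos trivial, if_pos hK, if_pos h0]
        simp only [List.getElem?_set, List.length_set, hlen]
        rcases eq_or_ne j (k + 1) with rfl | hj1
        · rw [if_pos rfl, if_pos hK, pvCell_at_succ cs k hget]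
        · rw [if_neg (Ne.symm hj1)]
          rcases eq_or_ne j (k - 1) with rfl | hj2
          · rw [if_pos rfl, if_pos (by omega), pvCell_at_pred cs k hget h0]
          · rw [if_neg (Ne.symm hj2)]
            rcases eq_or_ne j k with rfl | hj3
            · rw [if_pos rfl, if_pos (by omega), pvCell_at_self cs j hget]
            · rw [if_neg (Ne.symm hj3), hval j hj,
                pvCell_away cs k j hj3 (by omega) hj1]
      · -- 0 < k, ¬(k+1 < n)
        rw [if_pos trivial, if_neg hK, if_pos h0]
        simp only [List.getElem?_set, List.length_set, hlen]
        rcases eq_or_ne j (k - 1) with rfl | hj2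
        · rw [if_pos rfl, if_pos (by omega), pvCell_at_pred cs k hget h0]
        · rw [if_neg (Ne.symm hj2)]
          rcases eq_or_ne j k with rfl | hj3
          · rw [if_pos rfl, if_pos (by omega), pvCell_at_self cs j hget]
          · rw [if_neg (Ne.symm hj3), hval j hj,
              pvCell_away cs k j hj3 (by omega) (by omega)]
      · -- k = 0, k+1 < n
        rw [if_pos trivial, if_pos hK, if_neg h0]
        simp only [List.getElem?_set, List.length_set, hlen]
        rcases eq_or_ne j (k + 1) with rfl | hj1
        · rw [if_pos rfl, if_pos hK, pvCell_at_succ cs k hget]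
        · rw [if_neg (Ne.symm hj1)]
          rcases eq_or_ne j k with rfl | hj3
          · rw [if_pos rfl, if_pos (by omega), pvCell_at_self cs j hget]
          · rw [if_neg (Ne.symm hj3), hval j hj,
              pvCell_away cs k j hj3 (by omega) hj1]
      · -- k = 0, ¬(k+1 < n)
        rw [if_pos trivial, if_neg hK, if_neg h0]
        simp only [List.getElem?_set, hlen]
        rcases eq_or_ne j k with rfl | hj3
        · rw [if_pos rfl, if_pos (by omega), pvCell_at_self cs j hget]
        · rw [if_neg (Ne.symm hj3), hval j hj,
            pvCell_away cs k j hj3 (by omega) (by omega)]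
  · have hnot : cs[k]? ≠ some '*' := by rw [hgetc]; simpa using hstar
    unfold pvStepA
    rw [if_neg (by simpa using hstar)]
    refine ⟨hlen, fun j hj => ?_⟩
    rw [hval j hj, pvCell_frozen cs k j hnot]

theorem pvInv_fold (cs : List Char) : ∀ (ys : List Char) (k : Nat) (c : List String),
    cs.drop k = ys → pvInv cs k c →
    pvInv cs (k + ys.length) ((PySem.List.enumerate ys (k : Int)).foldl (pvStepA cs.length) c) := by
  intro ys
  induction ys with
  | nil => intro k c _ h; simpa [PySem.List.enumerate] using h
  | cons y ys ih =>
    intro k c hdrop h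
    have hk : k < cs.length := by
      by_contra hge
      rw [List.drop_eq_nil_of_le (by omega)] at hdrop
      exact (List.cons_ne_nil y ys) hdrop.symm
    have hy : cs[k] = y := by
      have h0 := congrArg (fun l => l[0]?) hdrop
      simp only [List.getElem?_drop, Nat.add_zero] at h0
      rw [List.getElem?_eq_getElem hk] at h0
      simpa using h0
    have hdrop' : cs.drop (k + 1) = ys := by
      have ht := congrArg List.tail hdrop
      simpa [List.tail_drop] using ht
    rw [PySem.List.enumerate_cons, List.foldl_cons]
    have hstep := pvInv_step cs k c hk h
    rw [hy] at hstep
    have hcast : (k : Int) + 1 = ((k + 1 : Nat) : Int) := by push_cast; ring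
    rw [hcast]
    have := ih (k + 1) _ hdrop' hstep
    have harith : k + 1 + ys.length = k + (y :: ys).length := by simp; omega
    rw [harith] at this
    exact this

theorem pvCell_eq_cellB (cs : List Char) (j : Nat) (hj : j < cs.length) :
    pvCell cs cs.length j = pvCellB cs cs.length j := by
  unfold pvCell pvCellB
  have g3 : (1 ≤ j ∧ j - 1 < cs.length ∧ cs[j-1]? = some '*') ↔
      (1 ≤ j ∧ cs[j-1]? = some '*') := by
    constructor
    · rintro ⟨a, -, c⟩; exact ⟨a, c⟩
    · rintro ⟨a, c⟩; exact ⟨a, by omega, c⟩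
  have g2 : (j < cs.length ∧ cs[j]? = some '*') ↔ (cs[j]? = some '*') := by
    constructor
    · rintro ⟨-, b⟩; exact b
    · intro b; exact ⟨hj, b⟩
  have g4 : (j + 1 = cs.length) ↔ (j = cs.length - 1) := by omega
  simp only [g2, g3, g4]

-- ===== VERDICT (by name: the statement is the Claim_ definition above) =====
theorem dotbracket2constraint_spec : Claim_equal_dotbracket2constraint := by
  intro line _
  unfold Spec_dotbracket2constraint dotbracket2constraint dotbracket2constraint_alt
  dsimp only
  set cs := line.toList with hcs
  have hfold := pvInv_fold cs cs 0 _ (by simp) (pvInv_init cs)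
  simp only [Nat.zero_add, Nat.cast_zero] at hfold
  obtain ⟨hlen, hval⟩ := hfold
  congr 1
  apply List.ext_getElem?
  intro j
  by_cases hj : j < cs.length
  · rw [hval j hj, List.getElem?_map]
    simp only [List.getElem?_range, hj, Option.map_some]
    rw [pvCell_eq_cellB cs j hj]
  · rw [List.getElem?_eq_none (by omega), List.getElem?_eq_none (by simp; omega)]
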